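-- pv_equiv track=rewrite | github.com/josmet52/fet_elt_epub | prg/fet_epub_utils.py | get_file_name_from_id
-- ===== SOURCE A (Python) =====
-- def get_file_name_from_id(file_id, opf_data):
--
--     manifest_end_found = False
--     manifest_begin_found = False
--     file_name_found = False
--     file_name = ""
--
--     for l in opf_data:
--         if "</manifest>" in l:
--             manifest_end_found = True
--         if manifest_begin_found and not manifest_end_found:
--             if "." in file_id :
--                 if l.find(file_id) != -1:
--                     file_name_begin_pos = l.find("href=") + 11
--                     file_name_end_pos = l.find("\"", file_name_begin_pos)
--                     file_name = l[file_name_begin_pos: file_name_end_pos]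
--                     file_name_found = True
--             else:
--                 if l.find("".join([file_id, "."])) != -1:
--                     file_name_begin_pos = l.find("href=") + 11
--                     file_name_end_pos = l.find("\"", file_name_begin_pos)
--                     file_name = l[file_name_begin_pos: file_name_end_pos]
--                     file_name_found = True
--         if "<manifest>" in l:
--             manifest_begin_found = True
--
--     if not file_name_found:
--         return "".join(["WARNING : file name of  ", file_id, " not found"]), file_name
--     else:
--         return "", file_name
-- ===== SOURCE B (Python) =====
-- def get_file_name_from_id(file_id, opf_data):
--     n = len(opf_data)
--     begin_idx = next((i for i, l in enumerate(opf_data) if "<manifest>" in l), None)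
--     end_idx = next((i for i, l in enumerate(opf_data) if "</manifest>" in l), n)
--     pattern = file_id if "." in file_id else file_id + "."
--     found = False
--     file_name = ""
--     if begin_idx is not None:
--         for l in opf_data[begin_idx + 1:end_idx]:
--             if pattern in l:
--                 b = l.find("href=") + 11
--                 file_name = l[b:l.find('"', b)]
--                 found = True
--     if found:
--         return "", file_name
--     return "WARNING : file name of  " + file_id + " not found", file_name
-- ===== Notes on version B (the rewrite author's own statement) =====
-- stated objective: simpler
-- what changed: B replaces A's single pass with four boolean state flags by first locating the indices of the first <manifest> and </manifest> lines, then folding the match test over only the slice strictly between them, with the found/name pair as the only loop state.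
import Mathlib
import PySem

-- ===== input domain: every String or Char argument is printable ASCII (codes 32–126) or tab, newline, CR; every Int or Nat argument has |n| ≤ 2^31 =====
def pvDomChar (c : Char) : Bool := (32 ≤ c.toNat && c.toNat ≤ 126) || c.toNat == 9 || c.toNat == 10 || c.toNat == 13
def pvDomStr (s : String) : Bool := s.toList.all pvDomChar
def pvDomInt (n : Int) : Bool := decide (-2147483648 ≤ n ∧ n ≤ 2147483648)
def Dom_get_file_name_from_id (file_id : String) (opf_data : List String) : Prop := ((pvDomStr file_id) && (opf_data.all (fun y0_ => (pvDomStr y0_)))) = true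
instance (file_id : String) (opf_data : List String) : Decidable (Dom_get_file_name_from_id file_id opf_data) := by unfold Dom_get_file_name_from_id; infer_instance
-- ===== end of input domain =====

-- B replaces A's whole-list scan with four flag variables by locating the first <manifest>/</manifest>
-- lines up front and folding the match test over only the slice between them (objective: simpler).

-- ===== PORT A =====
-- loop body of A's for-loop; state = (manifest_end_found, manifest_begin_found, file_name_found, file_name)
def aStep (file_id : String) (st : Bool × Bool × Bool × String) (l : String) : Bool × Bool × Bool × String :=
  let endF := st.1 || PySem.Str.isIn "</manifest>" l
  let beginF := st.2.1
  let found := st.2.2.1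
  let name := st.2.2.2
  let (found, name) :=
    if beginF && !endF then
      if PySem.Str.isIn "." file_id then
        if PySem.Str.find l file_id != -1 then
          let b := PySem.Str.find l "href=" + 11
          let e := PySem.Str.findFrom l "\"" b
          (true, PySem.Str.slice l (some b) (some e))
        else (found, name)
      else
        if PySem.Str.find l (file_id ++ ".") != -1 then
          let b := PySem.Str.find l "href=" + 11
          let e := PySem.Str.findFrom l "\"" b
          (true, PySem.Str.slice l (some b) (some e))
        else (found, name)
    else (found, name)
  let beginF := beginF || PySem.Str.isIn "<manifest>" l
  (endF, beginF, found, name)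

def get_file_name_from_id (file_id : String) (opf_data : List String) : String × String :=
  let st := opf_data.foldl (aStep file_id) (false, false, false, "")
  let found := st.2.2.1
  let name := st.2.2.2
  if !found then ("WARNING : file name of  " ++ file_id ++ " not found", name)
  else ("", name)

-- ===== PORT B =====
def bExtract (l : String) : String :=
  let b := PySem.Str.find l "href=" + 11
  PySem.Str.slice l (some b) (some (PySem.Str.findFrom l "\"" b))

def bStep (pattern : String) (st : Bool × String) (l : String) : Bool × String :=
  if PySem.Str.isIn pattern l then (true, bExtract l) else st

def get_file_name_from_id_alt (file_id : String) (opf_data : List String) : String × String :=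
  let n := opf_data.length
  let beginIdx? := opf_data.findIdx? (fun l => PySem.Str.isIn "<manifest>" l)
  let endIdx := (opf_data.findIdx? (fun l => PySem.Str.isIn "</manifest>" l)).getD n
  let pattern := if PySem.Str.isIn "." file_id then file_id else file_id ++ "."
  let fn :=
    match beginIdx? with
    | none => (false, "")
    | some b =>
        (PySem.List.slice opf_data (some ((b : Int) + 1)) (some (endIdx : Int))).foldl
          (bStep pattern) (false, "")
  if fn.1 then ("", fn.2)
  else ("WARNING : file name of  " ++ file_id ++ " not found", fn.2)

-- ===== PRECONDITION & SPEC =====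
def Spec_get_file_name_from_id (file_id : String) (opf_data : List String) (out : String × String) : Prop := out = get_file_name_from_id_alt file_id opf_data
instance (file_id : String) (opf_data : List String) (out : String × String) : Decidable (Spec_get_file_name_from_id file_id opf_data out) := by unfold Spec_get_file_name_from_id; infer_instance

-- ===== CLAIM (what is proved, stated in full; the proofs are below) =====
def Claim_equal_get_file_name_from_id : Prop := ∀ (file_id : String) (opf_data : List String), Dom_get_file_name_from_id file_id opf_data → Spec_get_file_name_from_id file_id opf_data (get_file_name_from_id file_id opf_data)

-- ===== LEMMAS AND PROOFS =====

def pvEndP (l : String) : Bool := PySem.Str.isIn "</manifest>" l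
def pvBeginP (l : String) : Bool := PySem.Str.isIn "<manifest>" l
def pvPat (file_id : String) : String :=
  if PySem.Str.isIn "." file_id then file_id else file_id ++ "."
-- index of the first </manifest> line, defaulting to the length
def pvFe (xs : List String) : Nat := (xs.findIdx? pvEndP).getD xs.length
-- the lines A actually tests: strictly between the first <manifest> and the first </manifest>
def pvSegment (xs : List String) : List String :=
  match xs.findIdx? pvBeginP with
  | none => []
  | some b => (xs.drop (b + 1)).take (pvFe xs - (b + 1))

-- 'l.find(sub) == -1' is 'sub not in l'
theorem pv_find_eq_neg_one (l sub : List Char) :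
    (PySem.Chars.find l sub = -1) ↔ PySem.Chars.isIn sub l = false := by
  rw [PySem.Chars.find_eq_neg_one_iff, PySem.Chars.isIn_eq_false_iff]

theorem pvFe_cons_false {x : String} {xs : List String} (hE : pvEndP x = false) :
    pvFe (x :: xs) = pvFe xs + 1 := by
  simp only [pvFe, List.findIdx?_cons, hE, Bool.false_eq_true, if_false]
  cases h : xs.findIdx? pvEndP <;> simp

theorem pvFe_cons_true {x : String} {xs : List String} (hE : pvEndP x = true) :
    pvFe (x :: xs) = 0 := by
  simp [pvFe, List.findIdx?_cons, hE]

-- A's loop body, written with B's building blocks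
theorem aStep_eq (fid : String) (e bg f : Bool) (nm l : String) :
    aStep fid (e, bg, f, nm) l =
      (e || pvEndP l, bg || pvBeginP l,
        if bg && !(e || pvEndP l) then bStep (pvPat fid) (f, nm) l else (f, nm)) := by
  simp only [aStep, bStep, bExtract, pvEndP, pvBeginP, pvPat]
  rcases hdot : PySem.Str.isIn "." fid with _ | _
  · rcases hin : PySem.Chars.isIn (fid.toList ++ ['.']) l.toList with _ | _
    · simp [hin, (pv_find_eq_neg_one l.toList (fid.toList ++ ['.'])).mpr hin]
    · have hne : ¬ PySem.Chars.find l.toList (fid.toList ++ ['.']) = -1 :=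
        fun h => by simp [(pv_find_eq_neg_one _ _).mp h] at hin
      simp [hin, hne]
  · rcases hin : PySem.Chars.isIn fid.toList l.toList with _ | _
    · simp [hin, (pv_find_eq_neg_one l.toList fid.toList).mpr hin]
    · have hne : ¬ PySem.Chars.find l.toList fid.toList = -1 :=
        fun h => by simp [(pv_find_eq_neg_one _ _).mp h] at hin
      simp [hin, hne]

-- once </manifest> has been seen, the loop never changes (found, name)
theorem foldl_end_absorb (fid : String) (xs : List String) (bg f : Bool) (nm : String) :
    (xs.foldl (aStep fid) (true, bg, f, nm)).2.2 = (f, nm) := by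
  induction xs generalizing bg with
  | nil => rfl
  | cons x xs ih => rw [List.foldl_cons, aStep_eq]; simpa using ih (bg || pvBeginP x)

-- inside the manifest, A's loop is B's fold over the lines before the first </manifest>
theorem foldl_inside (fid : String) (xs : List String) (f : Bool) (nm : String) :
    (xs.foldl (aStep fid) (false, true, f, nm)).2.2 =
      (xs.take (pvFe xs)).foldl (bStep (pvPat fid)) (f, nm) := by
  induction xs generalizing f nm with
  | nil => rfl
  | cons x xs ih =>
    rw [List.foldl_cons, aStep_eq]
    rcases hE : pvEndP x with _ | _
    · rw [pvFe_cons_false hE]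
      simp only [Bool.or_false, Bool.and_self, Bool.not_false, List.take_succ_cons,
        List.foldl_cons]
      rcases hb : bStep (pvPat fid) (f, nm) x with ⟨f', nm'⟩
      simpa [hb] using ih f' nm'
    · rw [pvFe_cons_true hE]
      simp [foldl_end_absorb]

-- before the manifest: A's whole loop equals B's fold over pvSegment
theorem foldl_before (fid : String) (xs : List String) (f : Bool) (nm : String) :
    (xs.foldl (aStep fid) (false, false, f, nm)).2.2 =
      (pvSegment xs).foldl (bStep (pvPat fid)) (f, nm) := by
  induction xs generalizing f nm with
  | nil => rfl
  | cons x xs ih =>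
    rw [List.foldl_cons, aStep_eq]
    rcases hB : pvBeginP x with _ | _ <;> rcases hE : pvEndP x with _ | _
    · -- neither tag on this line
      have hseg : pvSegment (x :: xs) = pvSegment xs := by
        simp only [pvSegment, List.findIdx?_cons, hB, Bool.false_eq_true, if_false,
          pvFe_cons_false hE]
        cases hfb : xs.findIdx? pvBeginP with
        | none => simp
        | some b => simp [List.drop_succ_cons, Nat.add_sub_add_right]
      simpa [hB, hE, hseg] using ih f nm
    · -- </manifest> before any <manifest>: nothing is ever processed
      have hseg : pvSegment (x :: xs) = [] := by
        simp only [pvSegment, List.findIdx?_cons, hB, Bool.false_eq_true, if_false,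
          pvFe_cons_true hE]
        cases hfb : xs.findIdx? pvBeginP with
        | none => simp
        | some b => simp
      simp [hseg, foldl_end_absorb]
    · -- <manifest> found here, no </manifest> yet
      have hseg : pvSegment (x :: xs) = xs.take (pvFe xs) := by
        simp [pvSegment, List.findIdx?_cons, hB, pvFe_cons_false hE]
      simp [hseg, foldl_inside]
    · -- line carries both tags: end wins, nothing processed
      have hseg : pvSegment (x :: xs) = [] := by
        simp [pvSegment, List.findIdx?_cons, hB, pvFe_cons_true hE]
      simp [hseg, foldl_end_absorb]

-- B's port, re-expressed through pvSegment
theorem alt_eq (fid : String) (xs : List String) :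
    get_file_name_from_id_alt fid xs =
      (let fn := (pvSegment xs).foldl (bStep (pvPat fid)) (false, "");
       if fn.1 then ("", fn.2)
       else ("WARNING : file name of  " ++ fid ++ " not found", fn.2)) := by
  simp only [get_file_name_from_id_alt]
  cases hfb : xs.findIdx? (fun l => PySem.Str.isIn "<manifest>" l) with
  | none =>
    have hseg : pvSegment xs = [] := by
      have hfb2 : xs.findIdx? pvBeginP = none := hfb
      simp [pvSegment, hfb2]
    simp only [hseg, List.foldl_nil]
  | some b =>
    have hseg : pvSegment xs = (xs.drop (b + 1)).take (pvFe xs - (b + 1)) := by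
      have hfb2 : xs.findIdx? pvBeginP = some b := hfb
      simp [pvSegment, hfb2]
    have hfe : (xs.findIdx? (fun l => PySem.Str.isIn "</manifest>" l)).getD xs.length
        = pvFe xs := rfl
    have hslice : PySem.List.slice xs (some ((b : Int) + 1)) (some ((pvFe xs : Nat) : Int)) =
        (xs.drop (b + 1)).take (pvFe xs - (b + 1)) := by
      have hc : ((b : Int) + 1) = ((b + 1 : Nat) : Int) := by push_cast; ring
      rw [hc, PySem.List.slice_natCast]
    rw [hfe]
    simp only [hslice, hseg, pvPat]

-- ===vvv=== main
theorem main_eq (fid : String) (xs : List String) :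
    get_file_name_from_id fid xs = get_file_name_from_id_alt fid xs := by
  rw [alt_eq]
  simp only [get_file_name_from_id]
  rw [foldl_before fid xs false ""]
  rcases hp : (pvSegment xs).foldl (bStep (pvPat fid)) (false, "") with ⟨fo, nm⟩
  cases fo <;> simp

-- ===== VERDICT (by name: the statement is the Claim_ definition above) =====
theorem get_file_name_from_id_spec : Claim_equal_get_file_name_from_id := by
  intro file_id opf_data _
  unfold Spec_get_file_name_from_id
  exact main_eq file_id opf_data
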